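-- pv_equiv track=rewrite | github.com/IonutZbir/Universita | Primo_Anno/Programmazione/Python/esameING/Esercitazioni/2023_05_18/esercizio-08-Soluzione_5_su_5.py | genera_sottostringhe
-- ===== SOURCE A (Python) =====
-- def genera_sottostringhe(stringa):
--     if stringa == "": # altrimenti, len(stringa) == 0
--         return [""]
--     else:
--         sottostringhe = []
--         for i in range(1, len(stringa) + 1):
--             sottostringhe.append(stringa[0:i])
--
--         sottostringhe_coda = genera_sottostringhe(stringa[1:])
--
--         # Si poteva aggiungere ogni elemento di sottostringhe_coda
--         # nella lista delle sottostringhe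
--
--         # for s in sottostringhe_coda:
--         #     sottostringhe.append(s)
--
--         # Oppure, ma meno efficiente
--         # sottostringhe = sottostringhe + sottostringhe_coda
--
--         # Oppure, usare il metodo "extend"
--         sottostringhe.extend(sottostringhe_coda)
--
--         return sottostringhe
-- ===== SOURCE B (Python) =====
-- def genera_sottostringhe(stringa):
--     n = len(stringa)
--     sottostringhe = []
--     for i in range(n):
--         for j in range(i + 1, n + 1):
--             sottostringhe.append(stringa[i:j])
--     sottostringhe.append("")
--     return sottostringhe
-- ===== Notes on version B (the rewrite author's own statement) =====
-- stated objective: faster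
-- what changed: Replaced the recursion on suffixes (prefix loop + recursive call on stringa[1:] + extend) with two explicit nested index loops appending stringa[i:j] and one trailing empty string; this removes the per-level full-string copy stringa[1:] and the deep recursion.
import Mathlib
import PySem

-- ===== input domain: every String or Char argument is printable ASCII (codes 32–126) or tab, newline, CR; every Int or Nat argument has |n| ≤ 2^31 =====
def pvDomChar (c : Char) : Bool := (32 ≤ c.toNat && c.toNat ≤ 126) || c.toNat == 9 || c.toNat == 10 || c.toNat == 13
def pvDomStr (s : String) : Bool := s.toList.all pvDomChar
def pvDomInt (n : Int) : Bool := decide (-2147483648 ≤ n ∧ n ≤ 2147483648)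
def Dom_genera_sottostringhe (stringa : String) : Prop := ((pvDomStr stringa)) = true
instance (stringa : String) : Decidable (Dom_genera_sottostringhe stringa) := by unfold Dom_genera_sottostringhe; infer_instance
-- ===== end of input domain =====

-- B changes the decomposition only: nested index loops instead of recursion on suffixes; same cost, simpler shape.

-- ===== PORT A =====
-- A, transliterated on the character list: '' test = [] match; 'stringa[0:i]' = slice;
-- 'stringa[1:]' is the tail (PySem.List.slice_from_one: slice l (some 1) none = l.tail),
-- recursed on structurally for termination.
def generaAChars (l : List Char) : List String :=
  match l with
  | [] => [""]
  | _ :: t =>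
      let sottostringhe :=
        (PySem.List.pyRange 1 ((l.length : Int) + 1) 1).foldl
          (fun acc i => acc ++ [String.ofList (PySem.List.slice l (some 0) (some i))]) []
      sottostringhe ++ generaAChars t

def genera_sottostringhe (stringa : String) : List String :=
  generaAChars stringa.toList

-- ===== PORT B =====
-- B: for i in range(n): for j in range(i+1, n+1): append stringa[i:j]; then append ''.
def generaBChars (l : List Char) : List String :=
  ((PySem.List.pyRange 0 (l.length : Int) 1).foldl
    (fun acc i =>
      (PySem.List.pyRange (i + 1) ((l.length : Int) + 1) 1).foldl
        (fun acc2 j => acc2 ++ [String.ofList (PySem.List.slice l (some i) (some j))]) acc)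
    []) ++ [""]

def genera_sottostringhe_alt (stringa : String) : List String :=
  generaBChars stringa.toList

-- ===== PRECONDITION & SPEC =====
def Spec_genera_sottostringhe (stringa : String) (out : List String) : Prop := out = genera_sottostringhe_alt stringa
instance (stringa : String) (out : List String) : Decidable (Spec_genera_sottostringhe stringa out) := by unfold Spec_genera_sottostringhe; infer_instance

-- ===== CLAIM (what is proved, stated in full; the proofs are below) =====
def Claim_equal_genera_sottostringhe : Prop := ∀ (stringa : String), Dom_genera_sottostringhe stringa → Spec_genera_sottostringhe stringa (genera_sottostringhe stringa)

-- ===== LEMMAS AND PROOFS =====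

-- the non-empty prefixes of xs, shortest first
def pvPrefixes (xs : List Char) : List String :=
  (List.range xs.length).map (fun k => String.ofList (xs.take (k + 1)))

-- canonical form both ports reach
def pvCanon (l : List Char) : List String :=
  (List.range l.length).flatMap (fun i => pvPrefixes (l.drop i)) ++ [""]

lemma A_inner (l : List Char) :
    (PySem.List.pyRange 1 ((l.length : Int) + 1) 1).foldl
      (fun acc i => acc ++ [String.ofList (PySem.List.slice l (some 0) (some i))]) []
    = pvPrefixes l := by
  rw [PySem.List.foldl_append_singleton_eq_map, PySem.List.pyRange_one]
  rw [show ((l.length : Int) + 1 - 1).toNat = l.length by omega]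
  rw [List.map_map, pvPrefixes, List.nil_append]
  refine List.map_congr_left (fun k hk => ?_)
  simp only [Function.comp_apply]
  rw [show (1 : Int) + (k : Int) = ((k + 1 : Nat) : Int) by push_cast; ring]
  rw [PySem.List.slice_zero_start, PySem.List.slice_to_natCast]

lemma A_canon (l : List Char) : generaAChars l = pvCanon l := by
  induction l with
  | nil => simp [generaAChars, pvCanon]
  | cons c t ih =>
    have hA : generaAChars (c :: t) = pvPrefixes (c :: t) ++ generaAChars t := by
      rw [generaAChars]
      show ((PySem.List.pyRange 1 (((c :: t).length : Int) + 1) 1).foldl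
        (fun acc i => acc ++ [String.ofList (PySem.List.slice (c :: t) (some 0) (some i))]) [])
        ++ generaAChars t = _
      rw [A_inner]
    rw [hA, ih, pvCanon, pvCanon, List.length_cons, List.range_succ_eq_map,
      List.flatMap_cons, List.drop_zero, List.flatMap_map]
    simp [List.append_assoc]

lemma B_inner (l : List Char) (i : Int) (h0 : 0 ≤ i) (acc : List String) :
    (PySem.List.pyRange (i + 1) ((l.length : Int) + 1) 1).foldl
      (fun acc2 j => acc2 ++ [String.ofList (PySem.List.slice l (some i) (some j))]) acc
    = acc ++ pvPrefixes (l.drop i.toNat) := by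
  obtain ⟨m, rfl⟩ : ∃ m : Nat, i = (m : Int) := ⟨i.toNat, (Int.toNat_of_nonneg h0).symm⟩
  rw [PySem.List.foldl_append_singleton_eq_map, PySem.List.pyRange_one]
  rw [show ((l.length : Int) + 1 - ((m : Int) + 1)).toNat = l.length - m by omega]
  rw [List.map_map, pvPrefixes, List.length_drop, Int.toNat_natCast]
  congr 1
  refine List.map_congr_left (fun k hk => ?_)
  simp only [Function.comp_apply]
  rw [show (m : Int) + 1 + (k : Int) = ((m + 1 + k : Nat) : Int) by push_cast; ring]
  rw [PySem.List.slice_natCast, show m + 1 + k - m = k + 1 by omega, List.take_drop]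

lemma B_fold (l : List Char) :
    ∀ (r : List Int), (∀ i ∈ r, 0 ≤ i) → ∀ acc : List String,
    r.foldl (fun acc i =>
        (PySem.List.pyRange (i + 1) ((l.length : Int) + 1) 1).foldl
          (fun acc2 j => acc2 ++ [String.ofList (PySem.List.slice l (some i) (some j))]) acc) acc
    = acc ++ r.flatMap (fun i => pvPrefixes (l.drop i.toNat)) := by
  intro r
  induction r with
  | nil => intro _ acc; simp
  | cons x xs ih =>
    intro h acc
    rw [List.foldl_cons, B_inner l x (h x (by simp)) acc,
      ih (fun i hi => h i (by simp [hi])), List.flatMap_cons, List.append_assoc]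

lemma B_canon (l : List Char) : generaBChars l = pvCanon l := by
  rw [generaBChars, B_fold l _ (fun i hi => ((PySem.List.mem_pyRange_one).mp hi).1), pvCanon,
    List.nil_append, PySem.List.pyRange_one, List.flatMap_map]
  rw [show ((l.length : Int) - 0).toNat = l.length by omega]
  simp

-- ===== VERDICT (by name: the statement is the Claim_ definition above) =====
theorem genera_sottostringhe_spec : Claim_equal_genera_sottostringhe := by
  intro s _
  unfold Spec_genera_sottostringhe genera_sottostringhe genera_sottostringhe_alt
  rw [A_canon, B_canon]
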